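-- pv_equiv track=rewrite | github.com/1610-Fappy/COMP3311-POKEMONDB | helpers.py | output_format_post
-- ===== SOURCE A (Python) =====
-- def split_tup_vals(tup_list : list):
--     if (len(tup_list) == 0):
--         return tup_list
--     evonum_list = []
--     name_list = []
--     req_list = []
--
--     for t in tup_list:
--         evonum_list.append(t[0])
--         name_list.append(t[2])
--         req_list.append(t[3])
--
--     return evonum_list, name_list, req_list
--
-- def output_format_post(tup_list : list):
--
--     evonum_list, name_list, req_list = split_tup_vals(tup_list)
--
--     outstring = ''
--     sixtab = False
--     fourtab = False
--     for i,value in enumerate(tup_list):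
--         if (i == 0 ):
--             outstring = outstring + '\t' + f"'{name_list[i]}' when the following requirements are satisfied:\n"
--         if (i != 0 and evonum_list[i] == evonum_list[i-1]):
--             if (sixtab):
--                 outstring = outstring + '\n' + '\t\t\t' + 'AND\n'
--                 sixtab = False
--             elif (fourtab):
--                 outstring = outstring + '\n' + '\t\t' + 'AND\n'
--                 fourtab = False
--         elif (i != 0 and evonum_list[i] != evonum_list[i-1]):
--             outstring = outstring + '\n' + '\t\t' + 'OR\n'
--
--         if (evonum_list.count(evonum_list[i]) != len(evonum_list) and evonum_list.count(evonum_list[i]) > 1):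
--             outstring = outstring + '\t\t\t\t' + req_list[i]
--             sixtab = True
--         elif (evonum_list.count(evonum_list[i]) != len(evonum_list) and evonum_list.count(evonum_list[i]) == 1):
--             outstring =  outstring + '\t\t\t' + req_list[i]
--         elif (evonum_list.count(evonum_list[i]) == len(evonum_list) and evonum_list.count(evonum_list[i]) > 1):
--             outstring =  outstring + '\t\t\t' + req_list[i]
--             fourtab = True
--         elif (evonum_list.count(evonum_list[i]) == len(evonum_list) and evonum_list.count(evonum_list[i]) == 1):
--             outstring =  outstring + '\t\t' + req_list[i]
--
--     return outstring
-- ===== SOURCE B (Python) =====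
-- def output_format_post(tup_list: list):
--     # Tally global evonum frequencies once, group consecutive runs, then emit group by group.
--     counts = {}
--     for t in tup_list:
--         counts[t[0]] = counts.get(t[0], 0) + 1
--     single_evo = len(counts) == 1
--     groups = []
--     for t in tup_list:
--         if groups and t[0] == groups[-1][0][0]:
--             groups[-1].append(t)
--         else:
--             groups.append([t])
--     parts = ["\t'" + tup_list[0][2] + "' when the following requirements are satisfied:\n"]
--     first = True
--     for g in groups:
--         if not first:
--             parts.append('\n\t\tOR\n')
--         dup = counts[g[0][0]] > 1
--         if single_evo:
--             reqtab = '\t\t\t' if dup else '\t\t'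
--             andtab = '\t\t'
--         else:
--             reqtab = '\t\t\t\t' if dup else '\t\t\t'
--             andtab = '\t\t\t'
--         parts.append(reqtab + g[0][3])
--         for t in g[1:]:
--             parts.append('\n' + andtab + 'AND\n' + reqtab + t[3])
--         first = False
--     return ''.join(parts)
-- ===== Notes on version B (the rewrite author's own statement) =====
-- stated objective: faster
-- what changed: Replaces A's index loop (which recomputes a global evonum_list.count() for every element and threads two carried indentation flags) with one frequency-tally pass, grouping into consecutive runs, and a group-by-group emission of the OR/AND separators and indentation.
import Mathlib
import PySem

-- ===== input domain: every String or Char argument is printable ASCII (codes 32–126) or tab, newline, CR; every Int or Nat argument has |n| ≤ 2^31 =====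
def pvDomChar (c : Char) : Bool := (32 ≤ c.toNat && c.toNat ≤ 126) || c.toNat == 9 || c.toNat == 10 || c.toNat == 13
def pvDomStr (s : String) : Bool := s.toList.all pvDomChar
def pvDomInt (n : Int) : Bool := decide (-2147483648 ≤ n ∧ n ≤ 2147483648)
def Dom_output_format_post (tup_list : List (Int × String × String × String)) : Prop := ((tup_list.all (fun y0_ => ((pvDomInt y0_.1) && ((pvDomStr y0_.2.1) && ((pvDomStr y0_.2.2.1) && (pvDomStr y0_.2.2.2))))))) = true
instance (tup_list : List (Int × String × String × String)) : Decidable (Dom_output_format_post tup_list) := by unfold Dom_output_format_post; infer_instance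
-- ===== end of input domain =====

-- B replaces A's index loop (a global .count() per element plus two carried indentation
-- flags) by one frequency pass, grouping into consecutive runs, and group-by-group
-- emission; same output, O(n) counting instead of A's O(n^2).

abbrev pvTup : Type := Int × String × String × String

-- ===== PORT A =====
-- Python helper split_tup_vals; on [] Python returns [] (so the caller's tuple unpacking
-- raises ValueError — excluded by Pre_); the port returns ([], [], []) there.
def split_tup_vals (tup_list : List (Int × String × String × String)) :
    List Int × List String × List String :=
  tup_list.foldl
    (fun acc t => (acc.1 ++ [t.1], acc.2.1 ++ [t.2.2.1], acc.2.2 ++ [t.2.2.2]))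
    ([], [], [])

-- A's 'for i, value in enumerate(tup_list)' loop, carrying (outstring, sixtab, fourtab)
def ofpLoop (evonum_list : List Int) (name_list req_list : List String) (n : Nat) :
    List pvTup → Int → String × Bool × Bool → String × Bool × Bool
  | [], _, st => st
  | _ :: rest, i, st =>
    let outstring := st.1
    let sixtab := st.2.1
    let fourtab := st.2.2
    let outstring :=
      if i = 0 then
        outstring ++ "\t" ++ "'" ++ PySem.List.pyGetD name_list i "" ++
          "' when the following requirements are satisfied:\n"
      else outstring
    let st1 : String × Bool × Bool :=
      if i ≠ 0 ∧ PySem.List.pyGetD evonum_list i 0 = PySem.List.pyGetD evonum_list (i - 1) 0 then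
        if sixtab then (outstring ++ "\n" ++ "\t\t\t" ++ "AND\n", false, fourtab)
        else if fourtab then (outstring ++ "\n" ++ "\t\t" ++ "AND\n", sixtab, false)
        else (outstring, sixtab, fourtab)
      else if i ≠ 0 ∧ PySem.List.pyGetD evonum_list i 0 ≠ PySem.List.pyGetD evonum_list (i - 1) 0 then
        (outstring ++ "\n" ++ "\t\t" ++ "OR\n", sixtab, fourtab)
      else (outstring, sixtab, fourtab)
    let c := PySem.List.count evonum_list (PySem.List.pyGetD evonum_list i 0)
    let st2 : String × Bool × Bool :=
      if c ≠ n ∧ 1 < c then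
        (st1.1 ++ "\t\t\t\t" ++ PySem.List.pyGetD req_list i "", true, st1.2.2)
      else if c ≠ n ∧ c = 1 then
        (st1.1 ++ "\t\t\t" ++ PySem.List.pyGetD req_list i "", st1.2.1, st1.2.2)
      else if c = n ∧ 1 < c then
        (st1.1 ++ "\t\t\t" ++ PySem.List.pyGetD req_list i "", st1.2.1, true)
      else if c = n ∧ c = 1 then
        (st1.1 ++ "\t\t" ++ PySem.List.pyGetD req_list i "", st1.2.1, st1.2.2)
      else (st1.1, st1.2.1, st1.2.2)
    ofpLoop evonum_list name_list req_list n rest (i + 1) st2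

def output_format_post (tup_list : List (Int × String × String × String)) : String :=
  let s := split_tup_vals tup_list
  (ofpLoop s.1 s.2.1 s.2.2 tup_list.length tup_list 0 ("", false, false)).1

-- ===== PORT B =====
def pvDefTup : pvTup := (0, "", "", "")

-- 'if groups and t[0] == groups[-1][0][0]: groups[-1].append(t) else: groups.append([t])'
def bStep (gs : List (List pvTup)) (t : pvTup) : List (List pvTup) :=
  if gs ≠ [] ∧ t.1 = (PySem.List.pyGetD (PySem.List.pyGetD gs (-1) []) 0 pvDefTup).1 then
    gs.dropLast ++ [PySem.List.pyGetD gs (-1) [] ++ [t]]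
  else gs ++ [[t]]

def bGroupFold (tup_list : List pvTup) : List (List pvTup) :=
  tup_list.foldl bStep []

-- one iteration of B's 'for g in groups' loop; state = (parts, first)
def bGroupStep (counts : PySem.Dict Int Int) (single_evo : Bool)
    (acc : List String × Bool) (g : List pvTup) : List String × Bool :=
  let parts := if acc.2 = false then acc.1 ++ ["\n" ++ "\t\t" ++ "OR\n"] else acc.1
  let dup := 1 < counts.getD (PySem.List.pyGetD g 0 pvDefTup).1 0
  let reqtab := if single_evo then (if dup then "\t\t\t" else "\t\t")
                else (if dup then "\t\t\t\t" else "\t\t\t")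
  let andtab := if single_evo then "\t\t" else "\t\t\t"
  let parts := parts ++ [reqtab ++ (PySem.List.pyGetD g 0 pvDefTup).2.2.2]
  -- 'for t in g[1:]' (g[1:] = g.drop 1: slice with nonnegative start and open end)
  let parts := (g.drop 1).foldl (fun ps t => ps ++ ["\n" ++ andtab ++ "AND\n" ++ reqtab ++ t.2.2.2]) parts
  (parts, false)

def output_format_post_alt (tup_list : List (Int × String × String × String)) : String :=
  let counts : PySem.Dict Int Int :=
    tup_list.foldl (fun d t => d.insert t.1 (d.getD t.1 0 + 1)) PySem.Dict.empty
  let single_evo : Bool := counts.size == 1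
  let groups := bGroupFold tup_list
  let parts : List String :=
    ["\t" ++ "'" ++ (PySem.List.pyGetD tup_list 0 pvDefTup).2.2.1 ++
      "' when the following requirements are satisfied:\n"]
  PySem.Str.join "" (groups.foldl (bGroupStep counts single_evo) (parts, true)).1

-- ===== PRECONDITION & SPEC =====
-- Pre_ excludes only the empty list, on which Python A raises ValueError (unpacking of []).
def Pre_output_format_post (tup_list : List (Int × String × String × String)) : Prop :=
  tup_list ≠ []
instance (tup_list : List (Int × String × String × String)) :
    Decidable (Pre_output_format_post tup_list) := by unfold Pre_output_format_post; infer_instance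

def pvWitness_output_format_post : (List (Int × String × String × String)) :=
  [(1, "x", "Pikachu", "level 10"), (1, "x", "Pikachu", "high friendship"), (2, "y", "Raichu", "use item")]

def Spec_output_format_post (tup_list : List (Int × String × String × String)) (out : String) : Prop :=
  out = output_format_post_alt tup_list
instance (tup_list : List (Int × String × String × String)) (out : String) :
    Decidable (Spec_output_format_post tup_list out) := by unfold Spec_output_format_post; infer_instance

-- ===== CLAIM (what is proved, stated in full; the proofs are below) =====
def Claim_equal_output_format_post : Prop :=
  ∀ (tup_list : List (Int × String × String × String)), Dom_output_format_post tup_list →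
    Pre_output_format_post tup_list →
    Spec_output_format_post tup_list (output_format_post tup_list)

-- ===== LEMMAS AND PROOFS =====

lemma pvStrExt {s t : String} (h : s.toList = t.toList) : s = t := by
  have h2 := congrArg String.ofList h
  simpa using h2

lemma pvEqTrue2 {a b : Prop} (ha : a) (hb : b) : (a ∧ b) = True := eq_true ⟨ha, hb⟩

lemma pvJoin_nil : PySem.Str.join "" ([] : List String) = "" := by decide

lemma pvJoin_cons (p : String) (ps : List String) :
    PySem.Str.join "" (p :: ps) = p ++ PySem.Str.join "" ps := by
  apply pvStrExt
  rw [String.toList_append, PySem.Str.toList_join, PySem.Str.toList_join]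
  cases ps with
  | nil => simp [PySem.Chars.join_singleton, PySem.Chars.join_nil]
  | cons q qs =>
    rw [List.map_cons, List.map_cons, PySem.Chars.join_cons_cons]
    simp

lemma pvJoin_single (p : String) : PySem.Str.join "" [p] = p := by
  rw [pvJoin_cons, pvJoin_nil, String.append_empty]

lemma pvJoin_append (ps qs : List String) :
    PySem.Str.join "" (ps ++ qs) = PySem.Str.join "" ps ++ PySem.Str.join "" qs := by
  induction ps with
  | nil => simp [pvJoin_nil, String.empty_append]
  | cons p ps ih =>
    rw [List.cons_append, pvJoin_cons, pvJoin_cons, ih, String.append_assoc]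

def pvEvos (tl : List pvTup) : List Int := tl.map (·.1)

abbrev pvAS (E : List Int) : Prop := ∀ e ∈ E, e = E.headD 0

def pvSix (E preE : List Int) : Bool := decide ((¬ pvAS E) ∧ ∃ e ∈ preE, 1 < E.count e)
def pvFour (E : List Int) : Bool := decide (pvAS E ∧ 1 < E.length)

def pvHeader (t0 : pvTup) : String :=
  "\t" ++ "'" ++ t0.2.2.1 ++ "' when the following requirements are satisfied:\n"

def pvReqTab (E : List Int) (e : Int) : String :=
  if E.count e = E.length then (if 1 < E.count e then "\t\t\t" else "\t\t")
  else (if 1 < E.count e then "\t\t\t\t" else "\t\t\t")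

def pvAndTab (E : List Int) (e : Int) : String :=
  if E.count e = E.length then "\n" ++ "\t\t" ++ "AND\n" else "\n" ++ "\t\t\t" ++ "AND\n"

def pvBody (E : List Int) : Int → List pvTup → String
  | _, [] => ""
  | prev, t :: rest =>
    (if t.1 = prev then pvAndTab E t.1 else "\n" ++ "\t\t" ++ "OR\n") ++
      (pvReqTab E t.1 ++ (t.2.2.2 ++ pvBody E t.1 rest))

lemma pvCount_len_iff (E : List Int) (e : Int) (he : e ∈ E) :
    E.count e = E.length ↔ pvAS E := by
  cases E with
  | nil => cases he
  | cons a E' =>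
    rw [List.count_eq_length]
    simp only [pvAS, List.headD_cons]
    constructor
    · intro h x hx
      have h1 := h a (by simp)
      have h2 := h x hx
      omega
    · intro h b hb
      have h1 := h b hb
      have h2 := h e he
      omega

lemma pvCount_two (E1 : List Int) (e : Int) (E2 : List Int) (h : e ∈ E1) :
    1 < (E1 ++ e :: E2).count e := by
  have h1 : 0 < E1.count e := List.count_pos_iff.mpr h
  rw [List.count_append, List.count_cons]
  simp only [BEq.rfl, if_pos]
  omega

lemma pvGet_mid {α : Type} (xs : List α) (y : α) (zs : List α) (d : α) :
    PySem.List.pyGetD (xs ++ y :: zs) (xs.length : Int) d = y := by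
  rw [PySem.List.pyGetD_natCast]
  rw [List.getD_eq_getElem _ d (by simp)]
  rw [List.getElem_append_right (le_refl _)]
  simp

lemma pvGet_last {α : Type} (xs : List α) (zs : List α) (d : α) (h : xs ≠ []) :
    PySem.List.pyGetD (xs ++ zs) ((xs.length : Int) - 1) d = xs.getLast h := by
  have h1 : 0 < xs.length := List.length_pos_iff.mpr h
  have h2 : ((xs.length : Int) - 1) = ((xs.length - 1 : Nat) : Int) := by omega
  rw [h2, PySem.List.pyGetD_natCast]
  rw [List.getD_eq_getElem _ d (by simp; omega)]
  rw [List.getElem_append_left (by omega)]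
  rw [List.getLast_eq_getElem]

lemma pvSplit_aux (l : List pvTup) :
    ∀ (a : List Int) (b c : List String),
      l.foldl (fun acc t => (acc.1 ++ [t.1], acc.2.1 ++ [t.2.2.1], acc.2.2 ++ [t.2.2.2])) (a, b, c)
        = (a ++ l.map (·.1), b ++ l.map (·.2.2.1), c ++ l.map (·.2.2.2)) := by
  induction l with
  | nil => intro a b c; simp
  | cons t l ih => intro a b c; simp [ih]

lemma pvSplit (tl : List pvTup) :
    split_tup_vals tl = (pvEvos tl, tl.map (·.2.2.1), tl.map (·.2.2.2)) := by
  unfold split_tup_vals pvEvos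
  rw [pvSplit_aux]
  simp

lemma ofpLoop_spec (tl : List pvTup) :
    ∀ (suf pre : List pvTup) (out : String) (hpre : pre ≠ []) (_ : pre ++ suf = tl),
      ofpLoop (pvEvos tl) (tl.map (·.2.2.1)) (tl.map (·.2.2.2)) tl.length suf (pre.length : Int)
          (out, pvSix (pvEvos tl) (pvEvos pre), pvFour (pvEvos tl))
        = (out ++ pvBody (pvEvos tl) ((pre.getLast hpre).1) suf,
           pvSix (pvEvos tl) (pvEvos tl), pvFour (pvEvos tl)) := by
  intro suf
  induction suf with
  | nil =>
    intro pre out hpre htl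
    have hp : pre = tl := by simpa using htl
    subst hp
    rw [show pvBody (pvEvos pre) ((pre.getLast hpre).1) [] = "" from rfl, String.append_empty]
    rfl
  | cons t rest ih =>
    intro pre out hpre htl
    have hne0 : ¬ ((pre.length : Int) = 0) := by
      have := List.length_pos_iff.mpr hpre; omega
    have hlenE : (pvEvos pre).length = pre.length := by simp [pvEvos]
    have hEdecomp : pvEvos tl = pvEvos pre ++ t.1 :: pvEvos rest := by
      rw [← htl]; simp [pvEvos]
    have hRdecomp : tl.map (·.2.2.2) = pre.map (·.2.2.2) ++ t.2.2.2 :: rest.map (·.2.2.2) := by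
      rw [← htl]; simp
    have hget_i : PySem.List.pyGetD (pvEvos tl) (pre.length : Int) 0 = t.1 := by
      rw [hEdecomp, ← hlenE, pvGet_mid]
    have hget_req : PySem.List.pyGetD (tl.map (·.2.2.2)) (pre.length : Int) "" = t.2.2.2 := by
      have hl : (pre.map (·.2.2.2)).length = pre.length := by simp
      rw [hRdecomp, ← hl, pvGet_mid]
    have hpreE : pvEvos pre ≠ [] := by
      simp [pvEvos]; exact hpre
    have hget_prev : PySem.List.pyGetD (pvEvos tl) ((pre.length : Int) - 1) 0
        = (pre.getLast hpre).1 := by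
      rw [hEdecomp, ← hlenE, pvGet_last _ _ _ hpreE]
      simp only [pvEvos]
      exact List.getLast_map _
    have hmem_t : t.1 ∈ pvEvos tl := by rw [hEdecomp]; simp
    have hmem_last : (pre.getLast hpre).1 ∈ pvEvos tl := by
      rw [hEdecomp]
      exact List.mem_append_left _ (List.mem_map_of_mem (List.getLast_mem hpre))
    have hlen_tl : (pvEvos tl).length = tl.length := by simp [pvEvos]
    have htl' : (pre ++ [t]) ++ rest = tl := by rw [← htl]; simp
    have hlast' : ((pre ++ [t]).getLast (by simp)).1 = t.1 := by
      rw [List.getLast_concat]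
    have hilen : ((pre ++ [t]).length : Int) = (pre.length : Int) + 1 := by simp
    have hn2 : 1 < tl.length := by
      rw [← htl]
      have := List.length_pos_iff.mpr hpre
      simp
      omega
    have c0 : (((pre.length : Nat) : Int) = 0) = False := eq_false hne0
    by_cases hA : pvAS (pvEvos tl)
    · -- all evonums equal: the element continues the single run
      have heq : t.1 = (pre.getLast hpre).1 := by
        have h1 := hA _ hmem_t
        have h2 := hA _ hmem_last
        omega
      have hc : List.count t.1 (pvEvos tl) = tl.length := by
        rw [← hlen_tl]
        exact (pvCount_len_iff _ _ hmem_t).mpr hA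
      have hc' : (pvEvos tl).count t.1 = (pvEvos tl).length := by
        rw [hlen_tl]; exact hc
      have hsix : pvSix (pvEvos tl) (pvEvos pre) = false := by
        simp only [pvSix, decide_eq_false_iff_not]
        rintro ⟨h, _⟩; exact h hA
      have hsix' : pvSix (pvEvos tl) (pvEvos (pre ++ [t])) = false := by
        simp only [pvSix, decide_eq_false_iff_not]
        rintro ⟨h, _⟩; exact h hA
      have hfour : pvFour (pvEvos tl) = true := by
        simp only [pvFour, decide_eq_true_eq]
        exact ⟨hA, by omega⟩
      have cA : (((pre.length : Nat) : Int) ≠ 0 ∧ t.1 = (pre.getLast hpre).1) = True :=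
        pvEqTrue2 hne0 (heq)
      have cO : (((pre.length : Nat) : Int) ≠ 0 ∧ t.1 ≠ (pre.getLast hpre).1) = False :=
        eq_false (by rintro ⟨_, hh⟩; exact hh heq)
      have c1 : (List.count t.1 (pvEvos tl) ≠ tl.length ∧ 1 < List.count t.1 (pvEvos tl)) = False :=
        eq_false (by rintro ⟨hh, _⟩; exact hh hc)
      have c2 : (List.count t.1 (pvEvos tl) ≠ tl.length ∧ List.count t.1 (pvEvos tl) = 1) = False :=
        eq_false (by rintro ⟨hh, _⟩; exact hh hc)
      have c3 : (List.count t.1 (pvEvos tl) = tl.length ∧ 1 < List.count t.1 (pvEvos tl)) = True :=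
        pvEqTrue2 hc (by omega)
      simp only [ofpLoop, hget_i, hget_prev, hget_req, PySem.List.count_eq, hsix, hfour,
        c0, cA, cO, c1, c2, c3, if_true, if_false, Bool.false_eq_true, eq_self_iff_true]
      rw [show (pre.length : Int) + 1 = ((pre ++ [t]).length : Int) from hilen.symm]
      rw [show (false : Bool) = pvSix (pvEvos tl) (pvEvos (pre ++ [t])) from hsix'.symm]
      rw [show (true : Bool) = pvFour (pvEvos tl) from hfour.symm]
      rw [ih (pre ++ [t]) _ (by simp) htl', hlast']
      simp only [Prod.mk.injEq, and_true, true_and]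
      rw [show pvBody (pvEvos tl) ((pre.getLast hpre).1) (t :: rest)
          = pvAndTab (pvEvos tl) t.1 ++
              (pvReqTab (pvEvos tl) t.1 ++ (t.2.2.2 ++ pvBody (pvEvos tl) t.1 rest)) from by
        simp only [pvBody, if_pos heq]]
      have d1 : ((pvEvos tl).count t.1 = (pvEvos tl).length) = True := eq_true hc'
      have d2 : (1 < (pvEvos tl).count t.1) = True := eq_true (show 1 < (pvEvos tl).count t.1 by rw [hc']; rw [hlen_tl]; omega)
      simp only [pvAndTab, pvReqTab, d1, d2, if_true]
      simp [String.append_assoc] <;> simp [← String.append_assoc]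
    · -- several distinct evonums
      have hcne : (pvEvos tl).count t.1 ≠ (pvEvos tl).length := by
        intro h; exact hA ((pvCount_len_iff _ _ hmem_t).mp h)
      have hcne' : List.count t.1 (pvEvos tl) ≠ tl.length := by
        rw [← hlen_tl]; exact hcne
      have hfour : pvFour (pvEvos tl) = false := by
        simp only [pvFour, decide_eq_false_iff_not]
        rintro ⟨h, _⟩; exact hA h
      have hcpos : 0 < List.count t.1 (pvEvos tl) := List.count_pos_iff.mpr hmem_t
      have d1 : ((pvEvos tl).count t.1 = (pvEvos tl).length) = False := eq_false hcne
      by_cases heq : t.1 = (pre.getLast hpre).1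
      · have hmemPre : t.1 ∈ pvEvos pre := by
          rw [heq]
          exact List.mem_map_of_mem (List.getLast_mem hpre)
        have hc2 : 1 < List.count t.1 (pvEvos tl) := by
          rw [hEdecomp]
          exact pvCount_two _ _ _ hmemPre
        have hsix : pvSix (pvEvos tl) (pvEvos pre) = true := by
          simp only [pvSix, decide_eq_true_eq]
          exact ⟨hA, ⟨t.1, hmemPre, hc2⟩⟩
        have hsix' : pvSix (pvEvos tl) (pvEvos (pre ++ [t])) = true := by
          simp only [pvSix, decide_eq_true_eq]
          refine ⟨hA, ⟨t.1, ?_, hc2⟩⟩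
          simp [pvEvos]
        have cA : (((pre.length : Nat) : Int) ≠ 0 ∧ t.1 = (pre.getLast hpre).1) = True :=
          pvEqTrue2 hne0 (heq)
        have cO : (((pre.length : Nat) : Int) ≠ 0 ∧ t.1 ≠ (pre.getLast hpre).1) = False :=
          eq_false (by rintro ⟨_, hh⟩; exact hh heq)
        have c1 : (List.count t.1 (pvEvos tl) ≠ tl.length ∧ 1 < List.count t.1 (pvEvos tl)) = True :=
          pvEqTrue2 hcne' (hc2)
        simp only [ofpLoop, hget_i, hget_prev, hget_req, PySem.List.count_eq, hsix, hfour,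
          c0, cA, cO, c1, if_true, if_false, Bool.false_eq_true, eq_self_iff_true]
        rw [show (pre.length : Int) + 1 = ((pre ++ [t]).length : Int) from hilen.symm]
        rw [show (true : Bool) = pvSix (pvEvos tl) (pvEvos (pre ++ [t])) from hsix'.symm]
        rw [show (false : Bool) = pvFour (pvEvos tl) from hfour.symm]
        rw [ih (pre ++ [t]) _ (by simp) htl', hlast']
        simp only [Prod.mk.injEq, and_true, true_and]
        rw [show pvBody (pvEvos tl) ((pre.getLast hpre).1) (t :: rest)
            = pvAndTab (pvEvos tl) t.1 ++
                (pvReqTab (pvEvos tl) t.1 ++ (t.2.2.2 ++ pvBody (pvEvos tl) t.1 rest)) from by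
          simp only [pvBody, if_pos heq]]
        have d2 : (1 < (pvEvos tl).count t.1) = True := eq_true hc2
        simp only [pvAndTab, pvReqTab, d1, d2, if_true, if_false]
        simp [String.append_assoc] <;> simp [← String.append_assoc]
      · -- new run: OR separator
        have cA : (((pre.length : Nat) : Int) ≠ 0 ∧ t.1 = (pre.getLast hpre).1) = False :=
          eq_false (by rintro ⟨_, hh⟩; exact heq hh)
        have cO : (((pre.length : Nat) : Int) ≠ 0 ∧ t.1 ≠ (pre.getLast hpre).1) = True :=
          pvEqTrue2 hne0 (heq)
        by_cases hc1 : 1 < List.count t.1 (pvEvos tl)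
        · have hsix' : pvSix (pvEvos tl) (pvEvos (pre ++ [t])) = true := by
            simp only [pvSix, decide_eq_true_eq]
            refine ⟨hA, ⟨t.1, ?_, hc1⟩⟩
            simp [pvEvos]
          have c1 : (List.count t.1 (pvEvos tl) ≠ tl.length ∧ 1 < List.count t.1 (pvEvos tl)) = True :=
            pvEqTrue2 hcne' (hc1)
          simp only [ofpLoop, hget_i, hget_prev, hget_req, PySem.List.count_eq,
            c0, cA, cO, c1, if_true, if_false]
          rw [show (pre.length : Int) + 1 = ((pre ++ [t]).length : Int) from hilen.symm]
          rw [show (true : Bool) = pvSix (pvEvos tl) (pvEvos (pre ++ [t])) from hsix'.symm]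
          rw [ih (pre ++ [t]) _ (by simp) htl', hlast']
          simp only [Prod.mk.injEq, and_true, true_and]
          rw [show pvBody (pvEvos tl) ((pre.getLast hpre).1) (t :: rest)
              = ("\n" ++ "\t\t" ++ "OR\n") ++
                  (pvReqTab (pvEvos tl) t.1 ++ (t.2.2.2 ++ pvBody (pvEvos tl) t.1 rest)) from by
            simp only [pvBody, if_neg heq]]
          have d2 : (1 < (pvEvos tl).count t.1) = True := eq_true hc1
          simp only [pvReqTab, d1, d2, if_true, if_false]
          simp [String.append_assoc] <;> simp [← String.append_assoc]
        · have hc1' : List.count t.1 (pvEvos tl) = 1 := by omega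
          have hsix' : pvSix (pvEvos tl) (pvEvos (pre ++ [t])) = pvSix (pvEvos tl) (pvEvos pre) := by
            apply decide_eq_decide.mpr
            constructor
            · rintro ⟨hna, e, he, hlt⟩
              refine ⟨hna, e, ?_, hlt⟩
              have hsplit : pvEvos (pre ++ [t]) = pvEvos pre ++ [t.1] := by simp [pvEvos]
              rw [hsplit] at he
              rcases List.mem_append.mp he with h | h
              · exact h
              · exfalso
                simp at h
                rw [h] at hlt
                omega
            · rintro ⟨hna, e, he, hlt⟩
              refine ⟨hna, e, ?_, hlt⟩
              have hsplit : pvEvos (pre ++ [t]) = pvEvos pre ++ [t.1] := by simp [pvEvos]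
              rw [hsplit]
              exact List.mem_append_left _ he
          have c1 : (List.count t.1 (pvEvos tl) ≠ tl.length ∧ 1 < List.count t.1 (pvEvos tl)) = False :=
            eq_false (by rintro ⟨_, hh⟩; omega)
          have c2 : (List.count t.1 (pvEvos tl) ≠ tl.length ∧ List.count t.1 (pvEvos tl) = 1) = True :=
            pvEqTrue2 hcne' (hc1')
          simp only [ofpLoop, hget_i, hget_prev, hget_req, PySem.List.count_eq,
            c0, cA, cO, c1, c2, if_true, if_false]
          rw [show (pre.length : Int) + 1 = ((pre ++ [t]).length : Int) from hilen.symm]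
          rw [show pvSix (pvEvos tl) (pvEvos pre) = pvSix (pvEvos tl) (pvEvos (pre ++ [t])) from hsix'.symm]
          rw [ih (pre ++ [t]) _ (by simp) htl', hlast']
          simp only [Prod.mk.injEq, and_true, true_and]
          rw [show pvBody (pvEvos tl) ((pre.getLast hpre).1) (t :: rest)
              = ("\n" ++ "\t\t" ++ "OR\n") ++
                  (pvReqTab (pvEvos tl) t.1 ++ (t.2.2.2 ++ pvBody (pvEvos tl) t.1 rest)) from by
            simp only [pvBody, if_neg heq]]
          have d2 : (1 < (pvEvos tl).count t.1) = False := eq_false (by omega)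
          simp only [pvReqTab, d1, d2, if_true, if_false]
          simp [String.append_assoc] <;> simp [← String.append_assoc]

lemma pvA_char (t0 : pvTup) (rest : List pvTup) :
    output_format_post (t0 :: rest)
      = pvHeader t0 ++ (pvReqTab (pvEvos (t0 :: rest)) t0.1 ++
          (t0.2.2.2 ++ pvBody (pvEvos (t0 :: rest)) t0.1 rest)) := by
  have hE0 : pvEvos (t0 :: rest) = t0.1 :: pvEvos rest := by simp [pvEvos]
  have hmem0 : t0.1 ∈ pvEvos (t0 :: rest) := by rw [hE0]; simp
  have hlen_tl : (pvEvos (t0 :: rest)).length = (t0 :: rest).length := by simp [pvEvos]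
  have hgetE : PySem.List.pyGetD (pvEvos (t0 :: rest)) 0 0 = t0.1 := by
    rw [hE0]; exact PySem.List.pyGetD_zero_cons _ _ _
  have hgetN : PySem.List.pyGetD ((t0 :: rest).map (·.2.2.1)) 0 "" = t0.2.2.1 := by
    rw [List.map_cons]; exact PySem.List.pyGetD_zero_cons _ _ _
  have hgetR : PySem.List.pyGetD ((t0 :: rest).map (·.2.2.2)) 0 "" = t0.2.2.2 := by
    rw [List.map_cons]; exact PySem.List.pyGetD_zero_cons _ _ _
  have hsingle : pvEvos [t0] = [t0.1] := by simp [pvEvos]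
  have hcpos : 0 < List.count t0.1 (pvEvos (t0 :: rest)) := List.count_pos_iff.mpr hmem0
  have cz : ((0 : Int) = 0) = True := eq_true rfl
  have cA : ∀ (p : Prop), (((0 : Int) ≠ 0) ∧ p) = False :=
    fun p => eq_false (by rintro ⟨h, _⟩; exact h rfl)
  simp only [output_format_post, pvSplit, ofpLoop, hgetE, hgetN, hgetR, PySem.List.count_eq,
    cz, cA, if_true, if_false]
  by_cases hA : pvAS (pvEvos (t0 :: rest))
  · have hc : List.count t0.1 (pvEvos (t0 :: rest)) = (t0 :: rest).length := by
      rw [← hlen_tl]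
      exact (pvCount_len_iff _ _ hmem0).mpr hA
    have hcc : (pvEvos (t0 :: rest)).count t0.1 = (pvEvos (t0 :: rest)).length := by
      rw [hlen_tl]; exact hc
    have hsix0 : pvSix (pvEvos (t0 :: rest)) (pvEvos [t0]) = false := by
      simp only [pvSix, decide_eq_false_iff_not]
      rintro ⟨h, _⟩; exact h hA
    have c1 : (List.count t0.1 (pvEvos (t0 :: rest)) ≠ (t0 :: rest).length ∧
        1 < List.count t0.1 (pvEvos (t0 :: rest))) = False :=
      eq_false (by rintro ⟨hh, _⟩; exact hh hc)
    have c2 : (List.count t0.1 (pvEvos (t0 :: rest)) ≠ (t0 :: rest).length ∧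
        List.count t0.1 (pvEvos (t0 :: rest)) = 1) = False :=
      eq_false (by rintro ⟨hh, _⟩; exact hh hc)
    cases rest with
    | nil =>
      have hcv : List.count t0.1 (pvEvos [t0]) = 1 := by
        simp [pvEvos, List.count_cons]
      have c3 : (List.count t0.1 (pvEvos [t0]) = ([t0] : List pvTup).length ∧
          1 < List.count t0.1 (pvEvos [t0])) = False :=
        eq_false (by rintro ⟨_, hh⟩; omega)
      have c4 : (List.count t0.1 (pvEvos [t0]) = ([t0] : List pvTup).length ∧
          List.count t0.1 (pvEvos [t0]) = 1) = True :=
        pvEqTrue2 (by simpa using hcv) hcv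
      simp only [c3, c4, if_true, if_false, ofpLoop]
      have d1 : ((pvEvos [t0]).count t0.1 = (pvEvos [t0]).length) = True := eq_true hcc
      have d2 : (1 < (pvEvos [t0]).count t0.1) = False := eq_false (by omega)
      rw [show pvBody (pvEvos [t0]) t0.1 [] = "" from rfl]
      simp only [pvHeader, pvReqTab, d1, d2, if_true, if_false]
      simp [String.append_assoc] <;> simp [← String.append_assoc]
    | cons t1 rest' =>
      have hn2 : 1 < (t0 :: t1 :: rest').length := by simp
      have hfour : pvFour (pvEvos (t0 :: t1 :: rest')) = true := by
        simp only [pvFour, decide_eq_true_eq]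
        exact ⟨hA, by rw [hlen_tl]; exact hn2⟩
      have c3 : (List.count t0.1 (pvEvos (t0 :: t1 :: rest')) = (t0 :: t1 :: rest').length ∧
          1 < List.count t0.1 (pvEvos (t0 :: t1 :: rest'))) = True :=
        pvEqTrue2 hc (by rw [hc]; exact hn2)
      simp only [c1, c2, c3, if_true, if_false]
      rw [show ((0 : Int) + 1) = (([t0] : List pvTup).length : Int) by simp]
      rw [show (false : Bool) = pvSix (pvEvos (t0 :: t1 :: rest')) (pvEvos [t0]) from hsix0.symm]
      rw [show (true : Bool) = pvFour (pvEvos (t0 :: t1 :: rest')) from hfour.symm]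
      rw [ofpLoop_spec (t0 :: t1 :: rest') (t1 :: rest') [t0] _ (by simp) (by simp)]
      have d1 : ((pvEvos (t0 :: t1 :: rest')).count t0.1 = (pvEvos (t0 :: t1 :: rest')).length) = True :=
        eq_true hcc
      have d2 : (1 < (pvEvos (t0 :: t1 :: rest')).count t0.1) = True :=
        eq_true (show 1 < (pvEvos (t0 :: t1 :: rest')).count t0.1 by rw [hcc]; rw [hlen_tl]; exact hn2)
      rw [show ([t0].getLast (by simp) : pvTup) = t0 from List.getLast_singleton _]
      simp only [pvHeader, pvReqTab, d1, d2, if_true, if_false]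
      simp [String.append_assoc] <;> simp [← String.append_assoc]
  · have hcne : List.count t0.1 (pvEvos (t0 :: rest)) ≠ (t0 :: rest).length := by
      rw [← hlen_tl]
      intro h; exact hA ((pvCount_len_iff _ _ hmem0).mp h)
    have hcc' : (pvEvos (t0 :: rest)).count t0.1 ≠ (pvEvos (t0 :: rest)).length := by
      rw [hlen_tl]; exact hcne
    have hfour : pvFour (pvEvos (t0 :: rest)) = false := by
      simp only [pvFour, decide_eq_false_iff_not]
      rintro ⟨h, _⟩; exact hA h
    have d1 : ((pvEvos (t0 :: rest)).count t0.1 = (pvEvos (t0 :: rest)).length) = False :=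
      eq_false hcc'
    by_cases hc1 : 1 < List.count t0.1 (pvEvos (t0 :: rest))
    · have hsix0 : pvSix (pvEvos (t0 :: rest)) (pvEvos [t0]) = true := by
        simp only [pvSix, decide_eq_true_eq]
        exact ⟨hA, ⟨t0.1, by rw [hsingle]; simp, hc1⟩⟩
      have c1 : (List.count t0.1 (pvEvos (t0 :: rest)) ≠ (t0 :: rest).length ∧
          1 < List.count t0.1 (pvEvos (t0 :: rest))) = True :=
        pvEqTrue2 hcne (hc1)
      simp only [c1, if_true, if_false]
      rw [show ((0 : Int) + 1) = (([t0] : List pvTup).length : Int) by simp]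
      rw [show (true : Bool) = pvSix (pvEvos (t0 :: rest)) (pvEvos [t0]) from hsix0.symm]
      rw [show (false : Bool) = pvFour (pvEvos (t0 :: rest)) from hfour.symm]
      rw [ofpLoop_spec (t0 :: rest) rest [t0] _ (by simp) (by simp)]
      have d2 : (1 < (pvEvos (t0 :: rest)).count t0.1) = True := eq_true hc1
      rw [show ([t0].getLast (by simp) : pvTup) = t0 from List.getLast_singleton _]
      simp only [pvHeader, pvReqTab, d1, d2, if_true, if_false]
      simp [String.append_assoc] <;> simp [← String.append_assoc]
    · have hc1' : List.count t0.1 (pvEvos (t0 :: rest)) = 1 := by omega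
      have hsix0 : pvSix (pvEvos (t0 :: rest)) (pvEvos [t0]) = false := by
        simp only [pvSix, decide_eq_false_iff_not]
        rintro ⟨_, e, he, hlt⟩
        rw [hsingle] at he
        simp at he
        rw [he] at hlt
        omega
      have c1 : (List.count t0.1 (pvEvos (t0 :: rest)) ≠ (t0 :: rest).length ∧
          1 < List.count t0.1 (pvEvos (t0 :: rest))) = False :=
        eq_false (by rintro ⟨_, hh⟩; omega)
      have c2 : (List.count t0.1 (pvEvos (t0 :: rest)) ≠ (t0 :: rest).length ∧
          List.count t0.1 (pvEvos (t0 :: rest)) = 1) = True :=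
        pvEqTrue2 hcne (hc1')
      simp only [c1, c2, if_true, if_false]
      rw [show ((0 : Int) + 1) = (([t0] : List pvTup).length : Int) by simp]
      have hspec := ofpLoop_spec (t0 :: rest) rest [t0]
          ("" ++ "\t" ++ "'" ++ t0.2.2.1 ++ "' when the following requirements are satisfied:\n" ++
            "\t\t\t" ++ t0.2.2.2) (by simp) (by simp)
      rw [hsix0] at hspec
      rw [hfour] at hspec
      rw [hspec]
      have d2 : (1 < (pvEvos (t0 :: rest)).count t0.1) = False := eq_false (by omega)
      rw [show ([t0].getLast (by simp) : pvTup) = t0 from List.getLast_singleton _]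
      simp only [pvHeader, pvReqTab, d1, d2, if_true, if_false]
      simp [String.append_assoc] <;> simp [← String.append_assoc]

-- ===== B-side =====

def pvRunsL : List pvTup → List (List pvTup)
  | [] => []
  | t :: rest =>
    (t :: rest.takeWhile (fun u => u.1 == t.1)) :: pvRunsL (rest.dropWhile (fun u => u.1 == t.1))
  termination_by l => l.length
  decreasing_by
    simp only [List.length_cons]
    exact Nat.lt_succ_of_le (List.length_dropWhile_le _ _)

lemma pvRunsL_cons (t : pvTup) (rest : List pvTup) :
    pvRunsL (t :: rest)
      = (t :: rest.takeWhile (fun u => u.1 == t.1)) :: pvRunsL (rest.dropWhile (fun u => u.1 == t.1)) := by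
  rw [pvRunsL]

lemma pvBfold_run :
    ∀ (suf : List pvTup) (gs : List (List pvTup)) (t0 : pvTup) (gt : List pvTup),
      List.foldl bStep (gs ++ [t0 :: gt]) suf
        = (gs ++ [t0 :: (gt ++ suf.takeWhile (fun u => u.1 == t0.1))])
            ++ pvRunsL (suf.dropWhile (fun u => u.1 == t0.1)) := by
  intro suf
  induction suf with
  | nil => intro gs t0 gt; simp [pvRunsL]
  | cons u rest ih =>
    intro gs t0 gt
    rw [List.foldl_cons]
    have hlast : PySem.List.pyGetD (gs ++ [t0 :: gt]) (-1) [] = t0 :: gt :=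
      PySem.List.pyGetD_neg_one_append_singleton _ _ _
    by_cases h : u.1 = t0.1
    · have hb : bStep (gs ++ [t0 :: gt]) u = gs ++ [t0 :: (gt ++ [u])] := by
        unfold bStep
        rw [if_pos ⟨by simp, by rw [hlast, PySem.List.pyGetD_zero_cons]; exact h⟩]
        rw [hlast, List.dropLast_concat]
        simp
      rw [hb, ih gs t0 (gt ++ [u])]
      have hbeq : (u.1 == t0.1) = true := by simp [h]
      simp [hbeq]
    · have hb : bStep (gs ++ [t0 :: gt]) u = (gs ++ [t0 :: gt]) ++ [[u]] := by
        unfold bStep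
        rw [if_neg (by
          rintro ⟨_, hh⟩
          rw [hlast, PySem.List.pyGetD_zero_cons] at hh
          exact h hh)]
      rw [hb]
      have hrec := ih (gs ++ [t0 :: gt]) u []
      simp only [List.nil_append] at hrec
      rw [hrec]
      have hbeq : (u.1 == t0.1) = false := by simp [h]
      simp [hbeq, pvRunsL_cons]

lemma pvBfold_eq (t0 : pvTup) (rest : List pvTup) :
    bGroupFold (t0 :: rest) = pvRunsL (t0 :: rest) := by
  unfold bGroupFold
  rw [List.foldl_cons]
  have h0 : bStep [] t0 = [[t0]] := by
    unfold bStep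
    rw [if_neg (by rintro ⟨h, _⟩; exact h rfl)]
    rfl
  rw [h0]
  have hrec := pvBfold_run rest [] t0 []
  simp only [List.nil_append] at hrec
  rw [hrec, pvRunsL_cons]
  simp

lemma pvCounts_eq (tl : List pvTup) :
    tl.foldl (fun d t => d.insert t.1 (d.getD t.1 0 + 1)) PySem.Dict.empty
      = PySem.Dict.counter (pvEvos tl) := by
  unfold pvEvos
  rw [← PySem.Dict.foldl_insert_getD_add_one_eq_counter, List.foldl_map]

lemma pvDedup_len_one (E : List Int) (hne : E ≠ []) :
    (PySem.Set.ofList E).length = 1 ↔ pvAS E := by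
  cases E with
  | nil => exact absurd rfl hne
  | cons a E' =>
    constructor
    · intro h
      cases hS : PySem.Set.ofList (a :: E') with
      | nil => rw [hS] at h; simp at h
      | cons x xs =>
        rw [hS] at h
        simp at h
        subst h
        intro e he
        have h1 : e ∈ PySem.Set.ofList (a :: E') := (PySem.Set.mem_ofList _ _).mpr he
        have h2 : a ∈ PySem.Set.ofList (a :: E') := (PySem.Set.mem_ofList _ _).mpr (by simp)
        rw [hS] at h1 h2
        simp at h1 h2
        simp only [List.headD_cons]
        omega
    · intro h
      have hmem : a ∈ PySem.Set.ofList (a :: E') := (PySem.Set.mem_ofList _ _).mpr (by simp)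
      have hall : ∀ x ∈ PySem.Set.ofList (a :: E'), x = a := by
        intro x hx
        have hxx := h x ((PySem.Set.mem_ofList _ _).mp hx)
        simpa using hxx
      have hnd := PySem.Set.nodup_ofList (a :: E')
      cases hS : PySem.Set.ofList (a :: E') with
      | nil => rw [hS] at hmem; cases hmem
      | cons x xs =>
        cases xs with
        | nil => simp
        | cons y ys =>
          rw [hS] at hall hnd
          have hx := hall x (by simp)
          have hy := hall y (by simp)
          rw [List.nodup_cons] at hnd
          exact absurd (by rw [hx, ← hy]; exact List.mem_cons_self : x ∈ y :: ys) hnd.1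

lemma pvSize_one (t0 : pvTup) (rest : List pvTup) :
    ((PySem.Dict.counter (pvEvos (t0 :: rest))).size == 1)
      = decide (pvAS (pvEvos (t0 :: rest))) := by
  rw [Bool.eq_iff_iff]
  simp only [beq_iff_eq, decide_eq_true_eq]
  have hsz : (PySem.Dict.counter (pvEvos (t0 :: rest))).size
      = (PySem.Set.ofList (pvEvos (t0 :: rest))).length := by
    rw [← PySem.Dict.keys_counter]
    simp [PySem.Dict.size, PySem.Dict.keys, List.length_map]
  rw [hsz]
  exact pvDedup_len_one _ (by simp [pvEvos])

lemma pvBody_run (E : List Int) (e : Int) :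
    ∀ (tw dw : List pvTup), (∀ u ∈ tw, u.1 = e) →
      pvBody E e (tw ++ dw)
        = PySem.Str.join "" (tw.map fun u => pvAndTab E e ++ (pvReqTab E e ++ u.2.2.2))
            ++ pvBody E e dw := by
  intro tw
  induction tw with
  | nil => intro dw _; simp [pvJoin_nil, String.empty_append]
  | cons u tw ih =>
    intro dw h
    have hu : u.1 = e := h u (by simp)
    rw [List.cons_append]
    simp only [pvBody]
    rw [if_pos hu, hu, ih dw (fun v hv => h v (by simp [hv]))]
    rw [List.map_cons, pvJoin_cons]
    simp [String.append_assoc] <;> simp [← String.append_assoc]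

lemma pvStep_false (tl : List pvTup) (t : pvTup) (tw : List pvTup) (parts : List String)
    (first : Bool) (hmem : t.1 ∈ pvEvos tl) :
    bGroupStep (PySem.Dict.counter (pvEvos tl)) (decide (pvAS (pvEvos tl))) (parts, first) (t :: tw)
      = ((if first = false then parts ++ ["\n" ++ "\t\t" ++ "OR\n"] else parts)
          ++ ([pvReqTab (pvEvos tl) t.1 ++ t.2.2.2]
          ++ tw.map (fun u => pvAndTab (pvEvos tl) t.1 ++ (pvReqTab (pvEvos tl) t.1 ++ u.2.2.2))), false) := by
  have hcl := pvCount_len_iff (pvEvos tl) t.1 hmem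
  simp only [bGroupStep, PySem.List.pyGetD_zero_cons, PySem.Dict.getD_counter,
    List.drop_succ_cons, List.drop_zero, PySem.List.foldl_append_singleton_eq_map]
  by_cases hA : pvAS (pvEvos tl)
  · have hc : (pvEvos tl).count t.1 = (pvEvos tl).length := hcl.mpr hA
    have d1 : ((pvEvos tl).count t.1 = (pvEvos tl).length) = True := eq_true hc
    by_cases hd : 1 < List.count t.1 (pvEvos tl)
    · have hdi : (1 < ((List.count t.1 (pvEvos tl) : Nat) : Int)) = True :=
        eq_true (by exact_mod_cast hd)
      have d2 : (1 < (pvEvos tl).count t.1) = True := eq_true hd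
      simp only [decide_eq_true hA, pvReqTab, pvAndTab, d1, d2, hdi, if_true, eq_self_iff_true]
      simp [String.append_assoc] <;> simp [← String.append_assoc]
    · have hdi : (1 < ((List.count t.1 (pvEvos tl) : Nat) : Int)) = False :=
        eq_false (by intro hh; exact hd (by exact_mod_cast hh))
      have d2 : (1 < (pvEvos tl).count t.1) = False := eq_false hd
      simp only [decide_eq_true hA, pvReqTab, pvAndTab, d1, d2, hdi, if_true, if_false,
        eq_self_iff_true]
      simp [String.append_assoc] <;> simp [← String.append_assoc]
  · have hc : (pvEvos tl).count t.1 ≠ (pvEvos tl).length := fun hh => hA (hcl.mp hh)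
    have d1 : ((pvEvos tl).count t.1 = (pvEvos tl).length) = False := eq_false hc
    by_cases hd : 1 < List.count t.1 (pvEvos tl)
    · have hdi : (1 < ((List.count t.1 (pvEvos tl) : Nat) : Int)) = True :=
        eq_true (by exact_mod_cast hd)
      have d2 : (1 < (pvEvos tl).count t.1) = True := eq_true hd
      simp only [decide_eq_false hA, pvReqTab, pvAndTab, d1, d2, hdi, if_true, if_false,
        Bool.false_eq_true]
      simp [String.append_assoc] <;> simp [← String.append_assoc]
    · have hdi : (1 < ((List.count t.1 (pvEvos tl) : Nat) : Int)) = False :=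
        eq_false (by intro hh; exact hd (by exact_mod_cast hh))
      have d2 : (1 < (pvEvos tl).count t.1) = False := eq_false hd
      simp only [decide_eq_false hA, pvReqTab, pvAndTab, d1, d2, hdi, if_true, if_false,
        Bool.false_eq_true]
      simp [String.append_assoc] <;> simp [← String.append_assoc]

lemma pvBEmit (tl : List pvTup) :
    ∀ (suf : List pvTup), (∀ u ∈ suf, u ∈ tl) →
      ∀ (prev : Int) (parts : List String),
      (∀ u, suf.head? = some u → u.1 ≠ prev) →
      PySem.Str.join ""
          ((pvRunsL suf).foldl
            (bGroupStep (PySem.Dict.counter (pvEvos tl)) (decide (pvAS (pvEvos tl)))) (parts, false)).1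
        = PySem.Str.join "" parts ++ pvBody (pvEvos tl) prev suf := by
  intro suf
  induction suf using pvRunsL.induct with
  | case1 =>
    intro _ prev parts _
    simp only [pvRunsL, List.foldl_nil]
    rw [show pvBody (pvEvos tl) prev [] = "" from rfl, String.append_empty]
  | case2 t rest ih =>
    intro hsub prev parts hhd
    rw [pvRunsL_cons, List.foldl_cons]
    have hmem : t.1 ∈ pvEvos tl := List.mem_map_of_mem (hsub t (by simp))
    rw [pvStep_false tl t _ parts false hmem]
    have hsub' : ∀ u ∈ rest.dropWhile (fun v => v.1 == t.1), u ∈ tl := fun u hu =>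
      hsub u (List.mem_cons_of_mem _ ((List.dropWhile_sublist _).subset hu))
    have hhd' : ∀ u, (rest.dropWhile (fun v => v.1 == t.1)).head? = some u → u.1 ≠ t.1 := by
      intro u hu
      have hh := List.head?_dropWhile_not (fun v => v.1 == t.1) rest
      rw [hu] at hh
      simpa using hh
    rw [ih hsub' t.1 _ hhd']
    have htk : ∀ u ∈ rest.takeWhile (fun v => v.1 == t.1), u.1 = t.1 := fun u hu => by
      simpa using List.mem_takeWhile_imp hu
    have hrun := pvBody_run (pvEvos tl) t.1 (rest.takeWhile (fun v => v.1 == t.1))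
        (rest.dropWhile (fun v => v.1 == t.1)) htk
    rw [List.takeWhile_append_dropWhile] at hrun
    have hne : t.1 ≠ prev := hhd t rfl
    rw [show pvBody (pvEvos tl) prev (t :: rest)
        = ("\n" ++ "\t\t" ++ "OR\n") ++
            (pvReqTab (pvEvos tl) t.1 ++ (t.2.2.2 ++ pvBody (pvEvos tl) t.1 rest)) from by
      simp only [pvBody, if_neg hne]]
    rw [hrun]
    simp only [eq_self_iff_true, if_true]
    simp only [pvJoin_append, pvJoin_single]
    simp [String.append_assoc] <;> simp [← String.append_assoc]

lemma pvB_char (t0 : pvTup) (rest : List pvTup) :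
    output_format_post_alt (t0 :: rest)
      = pvHeader t0 ++ (pvReqTab (pvEvos (t0 :: rest)) t0.1 ++
          (t0.2.2.2 ++ pvBody (pvEvos (t0 :: rest)) t0.1 rest)) := by
  simp only [output_format_post_alt]
  rw [pvCounts_eq, pvSize_one, pvBfold_eq, PySem.List.pyGetD_zero_cons]
  rw [pvRunsL_cons, List.foldl_cons]
  have hmem : t0.1 ∈ pvEvos (t0 :: rest) := by simp [pvEvos]
  rw [pvStep_false (t0 :: rest) t0 _ _ true hmem]
  have hsub' : ∀ u ∈ rest.dropWhile (fun v => v.1 == t0.1), u ∈ (t0 :: rest) := fun u hu =>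
    List.mem_cons_of_mem _ ((List.dropWhile_sublist _).subset hu)
  have hhd' : ∀ u, (rest.dropWhile (fun v => v.1 == t0.1)).head? = some u → u.1 ≠ t0.1 := by
    intro u hu
    have hh := List.head?_dropWhile_not (fun v => v.1 == t0.1) rest
    rw [hu] at hh
    simpa using hh
  rw [pvBEmit (t0 :: rest) _ hsub' t0.1 _ hhd']
  have htk : ∀ u ∈ rest.takeWhile (fun v => v.1 == t0.1), u.1 = t0.1 := fun u hu => by
    simpa using List.mem_takeWhile_imp hu
  have hrun := pvBody_run (pvEvos (t0 :: rest)) t0.1 (rest.takeWhile (fun v => v.1 == t0.1))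
      (rest.dropWhile (fun v => v.1 == t0.1)) htk
  rw [List.takeWhile_append_dropWhile] at hrun
  rw [hrun]
  simp only [Bool.true_eq_false, if_false]
  simp only [pvJoin_append, pvJoin_single]
  simp only [pvHeader]
  simp [String.append_assoc] <;> simp [← String.append_assoc]

-- ===== VERDICT (by name: the statement is the Claim_ definition above) =====
theorem output_format_post_spec : Claim_equal_output_format_post := by
  unfold Claim_equal_output_format_post
  intro tl _ hpre
  unfold Spec_output_format_post
  cases tl with
  | nil => exact absurd rfl hpre
  | cons t0 rest => rw [pvA_char, pvB_char]
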